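-- pv_equiv track=rewrite | github.com/zyt-995/dsa2020 | cheatsheet/cheet_sheet-刘奕芃-2400094601.py | count_nodes_in_subtree
-- ===== SOURCE A (Python) =====
-- def count_nodes_in_subtree(m, n):
--     count = 0
--     left = m
--     right = m
--     while left <= n:
--         count += min(right,n) - left + 1
--         left = 2 * left
--         right = 2 * right + 1
--     return count
-- ===== SOURCE B (Python) =====
-- def count_nodes_in_subtree(m, n):
--     def count(node):
--         if node > n:
--             return 0
--         l = node
--         w = 1
--         while 2 * l <= n:
--             l = 2 * l
--             w = 2 * w
--         r = node
--         while 2 * r + 1 <= n: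
--             r = 2 * r + 1
--         if l <= r:
--             return 2 * w - 1
--         return 1 + count(2 * node) + count(2 * node + 1)
--     return count(m)
-- ===== Notes on version B (the rewrite author's own statement) =====
-- stated objective: alternative
-- what changed: Replaces A's level-by-level sweep (doubling [left,right] bounds, adding a clipped row width per level) with a recursive node-wise count that descends the leftmost and rightmost spines of each subtree and, when their depths coincide, returns the perfect-subtree size 2^(d+1)-1 directly, recursing into both children otherwise.
import Mathlib
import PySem

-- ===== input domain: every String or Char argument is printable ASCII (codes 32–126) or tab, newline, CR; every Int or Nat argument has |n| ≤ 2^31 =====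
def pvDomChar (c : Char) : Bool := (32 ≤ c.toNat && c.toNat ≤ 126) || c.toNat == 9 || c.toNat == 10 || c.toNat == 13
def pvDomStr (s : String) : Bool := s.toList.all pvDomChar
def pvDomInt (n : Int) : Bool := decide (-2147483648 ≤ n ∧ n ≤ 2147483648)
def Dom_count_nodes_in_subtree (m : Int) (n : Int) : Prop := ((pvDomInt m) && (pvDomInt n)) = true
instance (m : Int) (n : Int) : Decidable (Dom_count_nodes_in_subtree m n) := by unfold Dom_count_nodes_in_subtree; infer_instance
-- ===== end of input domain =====

-- B replaces A's level-by-level width sweep by a recursive count that descends the two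
-- boundary spines of each subtree and returns the perfect-subtree size directly when
-- their depths coincide (a different algorithm of similar cost on these inputs).


-- ===== PORT A =====
-- A's while-loop, step for step.  The extra conjunct '1 ≤ left' only makes the recursion
-- total in Lean: where it differs from Python's bare 'left <= n' test (left ≤ 0 ≤ n) the
-- Python loop never terminates, and those inputs are excluded by Pre_ below.
def pvALoop (n count left right : Int) : Int :=
  if _h : left ≤ n ∧ 1 ≤ left then
    pvALoop n (count + (min right n - left + 1)) (2 * left) (2 * right + 1)
  else count
termination_by (n + 1 - left).toNat
decreasing_by omega

def count_nodes_in_subtree (m : Int) (n : Int) : Int := pvALoop n 0 m m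

-- ===== PORT B =====
-- B's inner 'while 2*l <= n: l = 2*l; w = 2*w' loop; the conjunct '1 ≤ l' only makes the
-- recursion total in Lean (for l ≤ 0 ≤ n the Python loop never terminates; outside Pre_).
def pvLeft (n l w : Int) : Int × Int :=
  if _h : 2 * l ≤ n ∧ 1 ≤ l then pvLeft n (2 * l) (2 * w) else (l, w)
termination_by (n + 1 - l).toNat
decreasing_by omega

-- B's inner 'while 2*r + 1 <= n: r = 2*r + 1' loop; same remark about '1 ≤ r'.
def pvRight (n r : Int) : Int :=
  if _h : 2 * r + 1 ≤ n ∧ 1 ≤ r then pvRight n (2 * r + 1) else r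
termination_by (n + 1 - r).toNat
decreasing_by omega

-- B's recursive count(node).  The extra disjunct 'node ≤ 0' only makes the recursion
-- total in Lean: there Python B recurses forever (RecursionError), outside Pre_ below.
def pvBCount (n node : Int) : Int :=
  if _h : n < node ∨ node ≤ 0 then 0
  else
    let lw := pvLeft n node 1
    let r := pvRight n node
    if lw.1 ≤ r then 2 * lw.2 - 1
    else 1 + pvBCount n (2 * node) + pvBCount n (2 * node + 1)
termination_by (n + 1 - node).toNat
decreasing_by all_goals omega

def count_nodes_in_subtree_alt (m : Int) (n : Int) : Int := pvBCount n m

-- ===== PRECONDITION & SPEC =====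
-- Pre_ excludes exactly the inputs with m ≤ 0 and m ≤ n, on which Python A loops forever
-- (left never grows past n) and Python B's recursion never terminates (RecursionError).
def Pre_count_nodes_in_subtree (m : Int) (n : Int) : Prop := 1 ≤ m ∨ n < m
instance (m : Int) (n : Int) : Decidable (Pre_count_nodes_in_subtree m n) := by unfold Pre_count_nodes_in_subtree; infer_instance

def pvWitness_count_nodes_in_subtree : Int × Int := (2, 13)

def Spec_count_nodes_in_subtree (m : Int) (n : Int) (out : Int) : Prop := out = count_nodes_in_subtree_alt m n
instance (m : Int) (n : Int) (out : Int) : Decidable (Spec_count_nodes_in_subtree m n out) := by unfold Spec_count_nodes_in_subtree; infer_instance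

-- ===== CLAIM (what is proved, stated in full; the proofs are below) =====
def Claim_equal_count_nodes_in_subtree : Prop := ∀ (m : Int) (n : Int), Dom_count_nodes_in_subtree m n → Pre_count_nodes_in_subtree m n → Spec_count_nodes_in_subtree m n (count_nodes_in_subtree m n)

-- ===== LEMMAS AND PROOFS =====

-- Plain node-by-node count of the subtree of `node` clipped at n: the common reference
-- both ports are compared against.
def pvPlain (n node : Int) : Int :=
  if _h : n < node ∨ node ≤ 0 then 0
  else 1 + pvPlain n (2 * node) + pvPlain n (2 * node + 1)
termination_by (n + 1 - node).toNat
decreasing_by all_goals omega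

-- Sum of f over the integer interval [l, r].
def pvS (f : Int → Int) (l r : Int) : Int :=
  if l ≤ r then f l + pvS f (l + 1) r else 0
termination_by (r + 1 - l).toNat
decreasing_by omega

-- Interval induction used by the pvS lemmas below.
theorem pvIntervalInd (P : Int → Int → Prop)
    (step : ∀ l r : Int, l ≤ r → P (l + 1) r → P l r)
    (base : ∀ l r : Int, r < l → P l r) (l r : Int) : P l r := by
  have H : ∀ k : Nat, ∀ a b : Int, (b + 1 - a).toNat ≤ k → P a b := by
    intro k
    induction k with
    | zero => intro a b hk; exact base a b (by omega)
    | succ k ih =>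
      intro a b hk
      by_cases h : a ≤ b
      · exact step a b h (ih (a + 1) b (by omega))
      · exact base a b (by omega)
  exact H (r + 1 - l).toNat l r le_rfl

theorem pvS_eq (f : Int → Int) (l r : Int) :
    pvS f l r = if l ≤ r then f l + pvS f (l + 1) r else 0 := by rw [pvS]

theorem pvS_zero (f : Int → Int) (l r : Int)
    (h : ∀ v, l ≤ v → v ≤ r → f v = 0) : pvS f l r = 0 := by
  induction l, r using pvIntervalInd with
  | step l r hle ih =>
    rw [pvS_eq f l r, if_pos hle, h l le_rfl hle, ih (fun v hv hr => h v (by omega) hr)]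
    norm_num
  | base l r hlt => rw [pvS_eq f l r, if_neg (by omega)]

theorem pvS_add (f g : Int → Int) (l r : Int) :
    pvS (fun v => f v + g v) l r = pvS f l r + pvS g l r := by
  induction l, r using pvIntervalInd with
  | step l r hle ih =>
    rw [pvS_eq (fun v => f v + g v) l r, pvS_eq f l r, pvS_eq g l r,
        if_pos hle, if_pos hle, if_pos hle, ih]
    ring
  | base l r hlt =>
    rw [pvS_eq (fun v => f v + g v) l r, pvS_eq f l r, pvS_eq g l r,
        if_neg (by omega), if_neg (by omega), if_neg (by omega)]
    norm_num

theorem pvS_congr (f g : Int → Int) (l r : Int)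
    (h : ∀ v, l ≤ v → v ≤ r → f v = g v) : pvS f l r = pvS g l r := by
  induction l, r using pvIntervalInd with
  | step l r hle ih =>
    rw [pvS_eq f l r, pvS_eq g l r, if_pos hle, if_pos hle, h l le_rfl hle,
        ih (fun v hv hr => h v (by omega) hr)]
  | base l r hlt => rw [pvS_eq f l r, pvS_eq g l r, if_neg (by omega), if_neg (by omega)]

-- The children of the nodes l..r are exactly the nodes 2l..2r+1.
theorem pvS_pairs (f : Int → Int) (l r : Int) :
    pvS (fun v => f (2 * v) + f (2 * v + 1)) l r = pvS f (2 * l) (2 * r + 1) := by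
  induction l, r using pvIntervalInd with
  | step l r hle ih =>
    rw [pvS_eq (fun v => f (2 * v) + f (2 * v + 1)) l r, if_pos hle, ih,
        pvS_eq f (2 * l) (2 * r + 1), if_pos (by omega),
        pvS_eq f (2 * l + 1) (2 * r + 1), if_pos (by omega),
        (by ring : (2 : Int) * l + 1 + 1 = 2 * (l + 1))]
    ring
  | base l r hlt =>
    rw [pvS_eq (fun v => f (2 * v) + f (2 * v + 1)) l r, if_neg (by omega),
        pvS_eq f (2 * l) (2 * r + 1), if_neg (by omega)]

theorem pvS_ones (n l r : Int) :
    l ≤ n → l ≤ r → pvS (fun v => if v ≤ n then 1 else 0) l r = min r n - l + 1 := by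
  induction l, r using pvIntervalInd with
  | step l r hle ih =>
    intro hln _
    rw [pvS_eq (fun v => if v ≤ n then (1 : Int) else 0) l r, if_pos hle, if_pos hln]
    by_cases h1 : l + 1 ≤ r
    · by_cases h2 : l + 1 ≤ n
      · rw [ih h2 h1]; omega
      · rw [pvS_zero _ _ _ (fun v hv hr => by simp only [if_neg (by omega : ¬ v ≤ n)])]
        omega
    · rw [pvS_eq (fun v => if v ≤ n then (1 : Int) else 0) (l + 1) r, if_neg h1]
      omega
  | base l r hlt => intro h1 h2; omega

theorem pvPlain_zero (n v : Int) (h : n < v ∨ v ≤ 0) : pvPlain n v = 0 := by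
  rw [pvPlain, dif_pos h]

theorem pvPlain_unfold (n v : Int) (hv : 1 ≤ v) :
    pvPlain n v = (if v ≤ n then 1 else 0) + (pvPlain n (2 * v) + pvPlain n (2 * v + 1)) := by
  by_cases h : v ≤ n
  · rw [pvPlain, dif_neg (by omega), if_pos h]; ring
  · rw [if_neg h, pvPlain_zero n v (by omega), pvPlain_zero n (2 * v) (by omega),
        pvPlain_zero n (2 * v + 1) (by omega)]
    norm_num

-- ===== A's sweep equals the plain count =====

theorem pvMain (n : Int) : ∀ (k : Nat) (l r c : Int), (n + 1 - l).toNat ≤ k →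
    1 ≤ l → l ≤ r → pvALoop n c l r = c + pvS (pvPlain n) l r := by
  intro k
  induction k with
  | zero =>
    intro l r c hk hl hlr
    rw [pvALoop, dif_neg (by omega),
        pvS_zero _ _ _ (fun v hv hr => pvPlain_zero n v (by omega))]
    ring
  | succ k ih =>
    intro l r c hk hl hlr
    by_cases hln : l ≤ n
    · rw [pvALoop, dif_pos ⟨hln, hl⟩,
        ih (2 * l) (2 * r + 1) _ (by omega) (by omega) (by omega)]
      have hs : pvS (pvPlain n) l r
          = (min r n - l + 1) + pvS (pvPlain n) (2 * l) (2 * r + 1) := by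
        rw [pvS_congr (pvPlain n)
              (fun v => (if v ≤ n then 1 else 0) + (pvPlain n (2 * v) + pvPlain n (2 * v + 1)))
              l r (fun v hv _ => pvPlain_unfold n v (by omega)),
            pvS_add, pvS_ones n l r hln hlr, pvS_pairs]
      rw [hs]; ring
    · rw [pvALoop, dif_neg (by omega),
        pvS_zero _ _ _ (fun v hv hr => pvPlain_zero n v (by omega))]
      ring

-- ===== B's shortcut count equals the plain count =====

-- The left-spine loop multiplies both components by the same maximal power of two.
theorem pvLeft_spec (n : Int) : ∀ (l w : Int), 1 ≤ l →
    ∃ k : Nat, pvLeft n l w = (l * 2 ^ k, w * 2 ^ k) ∧ n < 2 * (l * 2 ^ k) ∧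
      (k = 0 ∨ l * 2 ^ k ≤ n) := by
  have H : ∀ (fuel : Nat) (l w : Int), (n + 1 - l).toNat ≤ fuel → 1 ≤ l →
      ∃ k : Nat, pvLeft n l w = (l * 2 ^ k, w * 2 ^ k) ∧ n < 2 * (l * 2 ^ k) ∧
        (k = 0 ∨ l * 2 ^ k ≤ n) := by
    intro fuel
    induction fuel with
    | zero =>
      intro l w hk hl
      refine ⟨0, ?_, by simpa using (by omega : n < 2 * l), Or.inl rfl⟩
      rw [pvLeft, dif_neg (by omega)]; simp
    | succ fuel ih =>
      intro l w hk hl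
      by_cases h : 2 * l ≤ n
      · obtain ⟨k, hrec, hlt, hle⟩ := ih (2 * l) (2 * w) (by omega) (by omega)
        refine ⟨k + 1, ?_, ?_, Or.inr ?_⟩
        · rw [pvLeft, dif_pos ⟨h, hl⟩, hrec, pow_succ]
          simp only [Prod.mk.injEq]; constructor <;> ring
        · rw [pow_succ, (by ring : 2 * (l * (2 ^ k * 2)) = 2 * (2 * l * 2 ^ k))]; exact hlt
        · rw [pow_succ, (by ring : l * (2 ^ k * 2) = 2 * l * 2 ^ k)]
          rcases hle with h0 | hle
          · subst h0; simpa using h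
          · exact hle
      · refine ⟨0, ?_, by simpa using (by omega : n < 2 * l), Or.inl rfl⟩
        rw [pvLeft, dif_neg (by omega)]; simp
  exact fun l w hl => H (n + 1 - l).toNat l w le_rfl hl

-- The right-spine loop sends r to (r+1)·2^k − 1 for the maximal such power.
theorem pvRight_spec (n : Int) : ∀ (r : Int), 1 ≤ r →
    ∃ k : Nat, pvRight n r = (r + 1) * 2 ^ k - 1 ∧ n < 2 * ((r + 1) * 2 ^ k - 1) + 1 ∧
      (k = 0 ∨ (r + 1) * 2 ^ k - 1 ≤ n) := by
  have H : ∀ (fuel : Nat) (r : Int), (n + 1 - r).toNat ≤ fuel → 1 ≤ r →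
      ∃ k : Nat, pvRight n r = (r + 1) * 2 ^ k - 1 ∧ n < 2 * ((r + 1) * 2 ^ k - 1) + 1 ∧
        (k = 0 ∨ (r + 1) * 2 ^ k - 1 ≤ n) := by
    intro fuel
    induction fuel with
    | zero =>
      intro r hk hr
      refine ⟨0, ?_, by simpa using (by omega : n < 2 * r + 1), Or.inl rfl⟩
      rw [pvRight, dif_neg (by omega)]; simp
    | succ fuel ih =>
      intro r hk hr
      by_cases h : 2 * r + 1 ≤ n
      · obtain ⟨k, hrec, hlt, hle⟩ := ih (2 * r + 1) (by omega) (by omega)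
        have harg : (2 * r + 1 + 1) * 2 ^ k = (r + 1) * 2 ^ (k + 1) := by
          rw [pow_succ]; ring
        refine ⟨k + 1, ?_, ?_, Or.inr ?_⟩
        · rw [pvRight, dif_pos ⟨h, hr⟩, hrec, harg]
        · rw [← harg]; exact hlt
        · rcases hle with h0 | hle
          · subst h0
            have : (r + 1) * 2 ^ (0 + 1) - 1 = 2 * r + 1 := by rw [pow_succ]; ring_nf
            omega
          · rw [← harg]; omega
      · refine ⟨0, ?_, by simpa using (by omega : n < 2 * r + 1), Or.inl rfl⟩
        rw [pvRight, dif_neg (by omega)]; simp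
  exact fun r hr => H (n + 1 - r).toNat r le_rfl hr

-- A subtree that is full down to depth d and empty below is perfect: 2^(d+1) − 1 nodes.
theorem pvPlain_perfect (n : Int) : ∀ (d : Nat) (v : Int), 1 ≤ v →
    (v + 1) * 2 ^ d - 1 ≤ n → n < v * 2 ^ (d + 1) → pvPlain n v = 2 ^ (d + 1) - 1 := by
  intro d
  induction d with
  | zero =>
    intro v hv h1 h2
    simp only [pow_zero, pow_succ] at h1 h2 ⊢
    have hvn : v ≤ n := by omega
    rw [pvPlain, dif_neg (by omega), pvPlain_zero n (2 * v) (by omega),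
        pvPlain_zero n (2 * v + 1) (by omega)]
    norm_num
  | succ d ih =>
    intro v hv h1 h2
    have hp : (0 : Int) < 2 ^ d := by positivity
    have h1' : (v + 1) * 2 ^ (d + 1) - 1 ≤ n := h1
    have e1 : (v + 1) * 2 ^ (d + 1) = (2 * v + 2) * 2 ^ d := by rw [pow_succ]; ring
    have e2 : v * 2 ^ (d + 1 + 1) = 2 * v * 2 ^ (d + 1) := by rw [pow_succ _ (d + 1)]; ring
    have hL : pvPlain n (2 * v) = 2 ^ (d + 1) - 1 := by
      refine ih (2 * v) (by omega) ?_ ?_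
      · have : (2 * v + 1) * 2 ^ d ≤ (2 * v + 2) * 2 ^ d := by nlinarith
        omega
      · omega
    have hR : pvPlain n (2 * v + 1) = 2 ^ (d + 1) - 1 := by
      refine ih (2 * v + 1) (by omega) ?_ ?_
      · have : (2 * v + 1 + 1) * 2 ^ d = (v + 1) * 2 ^ (d + 1) := by rw [pow_succ]; ring
        omega
      · have : 2 * v * 2 ^ (d + 1) ≤ (2 * v + 1) * 2 ^ (d + 1) := by
          nlinarith [pow_pos (by norm_num : (0 : Int) < 2) (d + 1)]
        omega
    have hvn : v ≤ n := by nlinarith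
    rw [pvPlain, dif_neg (by omega), hL, hR, pow_succ 2 (d + 1)]
    ring
  
theorem pvB_eq_plain (n : Int) : ∀ (fuel : Nat) (v : Int), (n + 1 - v).toNat ≤ fuel →
    pvBCount n v = pvPlain n v := by
  intro fuel
  induction fuel with
  | zero =>
    intro v hk
    by_cases h : n < v ∨ v ≤ 0
    · rw [pvBCount, dif_pos h, pvPlain_zero n v h]
    · omega
  | succ fuel ih =>
    intro v hk
    by_cases h : n < v ∨ v ≤ 0
    · rw [pvBCount, dif_pos h, pvPlain_zero n v h]
    · have hv : 1 ≤ v := by omega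
      have hvn : v ≤ n := by omega
      obtain ⟨k1, hl, hl2, hl3⟩ := pvLeft_spec n v 1 hv
      obtain ⟨k2, hr, hr2, hr3⟩ := pvRight_spec n v hv
      have hk1 : (0 : Int) < 2 ^ k1 := by positivity
      have hk2 : (0 : Int) < 2 ^ k2 := by positivity
      rw [pvBCount, dif_neg h]
      simp only [hl, hr]
      by_cases hperf : v * 2 ^ k1 ≤ (v + 1) * 2 ^ k2 - 1
      · rw [if_pos hperf, one_mul]
        -- the two spine depths coincide: k1 = k2
        have hle1 : (v + 1) * 2 ^ k2 - 1 ≤ n := by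
          rcases hr3 with h0 | h0
          · subst h0; simpa using hvn
          · exact h0
        have hk12 : k1 = k2 := by
          have a1 : v * 2 ^ k1 < v * 2 ^ (k2 + 1) := by
            calc v * 2 ^ k1 ≤ (v + 1) * 2 ^ k2 - 1 := hperf
            _ < 2 * v * 2 ^ k2 := by nlinarith
            _ = v * 2 ^ (k2 + 1) := by rw [pow_succ]; ring
          have a2 : (v + 1) * 2 ^ k2 < (v + 1) * 2 ^ (k1 + 1) := by
            calc (v + 1) * 2 ^ k2 ≤ n + 1 := by omega
            _ ≤ 2 * (v * 2 ^ k1) := by omega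
            _ < (v + 1) * 2 ^ (k1 + 1) := by rw [pow_succ]; nlinarith
          have b1 : (2 : Int) ^ k1 < 2 ^ (k2 + 1) := lt_of_mul_lt_mul_left a1 (by omega)
          have b2 : (2 : Int) ^ k2 < 2 ^ (k1 + 1) := lt_of_mul_lt_mul_left a2 (by omega)
          have c1 : k1 < k2 + 1 := by
            exact_mod_cast (pow_lt_pow_iff_right₀ (by norm_num : (1 : Int) < 2)).1 b1
          have c2 : k2 < k1 + 1 := by
            exact_mod_cast (pow_lt_pow_iff_right₀ (by norm_num : (1 : Int) < 2)).1 b2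
          omega
        subst hk12
        rw [pvPlain_perfect n k1 v hv hle1 (by rw [pow_succ]; nlinarith), pow_succ]
        ring
      · rw [if_neg hperf, ih (2 * v) (by omega), ih (2 * v + 1) (by omega)]
        conv_rhs => rw [pvPlain]
        rw [dif_neg h]
  
-- ===== VERDICT (by name: the statement is the Claim_ definition above) =====
theorem count_nodes_in_subtree_spec : Claim_equal_count_nodes_in_subtree := by
  intro m n _dom pre
  unfold Spec_count_nodes_in_subtree count_nodes_in_subtree count_nodes_in_subtree_alt
  rw [pvB_eq_plain n (n + 1 - m).toNat m le_rfl]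
  by_cases hmn : m ≤ n
  · have hm : 1 ≤ m := by rcases pre with h | h <;> omega
    rw [pvMain n (n + 1 - m).toNat m m 0 le_rfl hm le_rfl,
        pvS_eq, if_pos le_rfl, pvS_eq, if_neg (by omega)]
    ring
  · rw [pvALoop, dif_neg (by omega), pvPlain_zero n m (by omega)]
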